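-- pv_equiv track=rewrite | github.com/Kiwi8474/vm-assembler-compiler | tools/mxc.py | handle_conditionals_and_defines
-- ===== SOURCE A (Python) =====
-- class CompilerError(Exception):
--     def __init__(self, message, line=None, token=None):
--         self.message = message
--         self.line = line
--         self.token = token
--         super().__init__(self.message)
--
--     def __str__(self):
--         prefix = f"[Error in line {self.line}] " if self.line else "[Compiler Error] "
--         token_info = f" (at '{self.token}')" if self.token else ""
--         return f"\n{prefix}{self.message}{token_info}"
--
-- def handle_conditionals_and_defines(code):
--     lines = code.splitlines()
--     output = []
--     defines = {}
--     active_stack = [True]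
--     condition_met_stack = [True]
--
--     for line_num, line in enumerate(lines, 1):
--         stripped = line.strip()
--
--         if stripped.startswith("#define") and active_stack[-1]:
--             parts = stripped.split()
--             if len(parts) >= 2:
--                 name = parts[1]
--                 value = " ".join(parts[2:]) if len(parts) > 2 else ""
--                 defines[name] = value
--             continue
--
--         if stripped.startswith("#ifdef"):
--             name = stripped.split()[1] if len(stripped.split()) > 1 else ""
--             met = (name in defines)
--             condition_met_stack.append(met)
--             active_stack.append(met and active_stack[-1])
--             continue
--
--         elif stripped.startswith("#ifndef"):
--             name = stripped.split()[1] if len(stripped.split()) > 1 else ""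
--             met = (name not in defines)
--             condition_met_stack.append(met)
--             active_stack.append(met and active_stack[-1])
--             continue
--
--         elif stripped.startswith("#else"):
--             if len(active_stack) <= 1:
--                 raise CompilerError(f"Line {line_num}: #else without #ifdef/#ifndef")
--             last_met = condition_met_stack[-1]
--             parent_active = active_stack[-2]
--             active_stack[-1] = (not last_met) and parent_active
--             continue
--
--         elif stripped.startswith("#endif"):
--             if len(active_stack) <= 1:
--                 raise CompilerError(f"Line {line_num}: #endif without matching #ifdef")
--             active_stack.pop()
--             condition_met_stack.pop()
--             continue
--
--         if active_stack[-1]: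
--             output.append(line)
--
--     if len(active_stack) > 1:
--         raise CompilerError("Missing #endif at end of file.")
--
--     return "\n".join(output), defines
-- ===== SOURCE B (Python) =====
-- # B: recursive-descent preprocessor over the line list; the nesting of
-- # #ifdef/#ifndef blocks is handled by recursion (walk/conditional) instead of
-- # explicit active/condition-met stacks.
--
-- class CompilerError(Exception):
--     def __init__(self, message, line=None, token=None):
--         self.message = message
--         self.line = line
--         self.token = token
--         super().__init__(self.message)
--
--     def __str__(self):
--         prefix = f"[Error in line {self.line}] " if self.line else "[Compiler Error] "
--         token_info = f" (at '{self.token}')" if self.token else ""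
--         return f"\n{prefix}{self.message}{token_info}"
--
-- def handle_conditionals_and_defines(code):
--     lines = code.splitlines()
--     output = []
--     defines = {}
--
--     def walk(rest, active):
--         """Consume lines until an unmatched #else/#endif (returned, consumed)
--         or end of input; nested conditionals are handled recursively."""
--         while rest:
--             s = rest[0].strip()
--             if s.startswith("#define"):
--                 if active:
--                     parts = s.split()
--                     if len(parts) >= 2:
--                         defines[parts[1]] = " ".join(parts[2:])
--                 rest = rest[1:]
--             elif s.startswith("#ifdef") or s.startswith("#ifndef"):
--                 parts = s.split()
--                 name = parts[1] if len(parts) > 1 else ""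
--                 met = (name in defines) if s.startswith("#ifdef") else (name not in defines)
--                 rest = conditional(rest[1:], met, active)
--             elif s.startswith("#else"):
--                 return rest[1:], "else"
--             elif s.startswith("#endif"):
--                 return rest[1:], "endif"
--             else:
--                 if active:
--                     output.append(rest[0])
--                 rest = rest[1:]
--         return [], "eof"
--
--     def conditional(rest, met, parent_active):
--         """Process one whole conditional (after its #ifdef/#ifndef line) up to
--         and including its matching #endif; return the lines after it."""
--         rest, kind = walk(rest, met and parent_active)
--         while kind == "else":
--             rest, kind = walk(rest, (not met) and parent_active)
--         if kind == "eof":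
--             raise CompilerError("Missing #endif at end of file.")
--         return rest
--
--     rest, kind = walk(lines, True)
--     if kind != "eof":
--         raise CompilerError(f"#{kind} without matching #ifdef/#ifndef")
--
--     return "\n".join(output), defines
-- ===== Notes on version B (the rewrite author's own statement) =====
-- stated objective: alternative
-- what changed: B replaces A's single pass with explicit active/condition-met stacks by a recursive-descent walk over the line list: walk consumes lines up to an unmatched #else/#endif and a conditional helper recurses into each #ifdef/#ifndef block, threading the active flag through the recursion instead of maintaining stacks.
import Mathlib
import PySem

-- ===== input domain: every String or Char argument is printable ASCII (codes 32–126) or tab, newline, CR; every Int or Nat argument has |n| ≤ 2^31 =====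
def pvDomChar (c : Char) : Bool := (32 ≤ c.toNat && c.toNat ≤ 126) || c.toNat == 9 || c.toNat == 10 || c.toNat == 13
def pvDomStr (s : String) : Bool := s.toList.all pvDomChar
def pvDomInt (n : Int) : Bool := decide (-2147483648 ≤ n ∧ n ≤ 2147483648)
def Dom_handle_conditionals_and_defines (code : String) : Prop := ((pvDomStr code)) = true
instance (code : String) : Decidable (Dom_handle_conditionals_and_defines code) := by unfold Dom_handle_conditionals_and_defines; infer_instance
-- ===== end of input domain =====

-- B replaces A's explicit active/condition-met stacks by a recursive-descent walk over the
-- line list (objective: alternative decomposition, same cost). The claim is about the return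
-- value; the inputs on which Python A raises CompilerError are excluded by Pre_ (B raises on
-- exactly the same inputs).

-- ===== PORT A =====
-- A's stacks: Python list end = Lean list head.  line_num only feeds exception messages;
-- raising is modelled as `none` (those inputs are excluded by Pre_).
def stepA (st : Option (List String × PySem.Dict String String × List Bool × List Bool))
    (line : String) : Option (List String × PySem.Dict String String × List Bool × List Bool) :=
  match st with
  | none => none
  | some (out, defs, astk, cstk) =>
    match astk, cstk with
    | a :: as', m :: cs' =>
      let s := PySem.Str.strip line
      if PySem.Str.startswith s "#define" && a then
        let parts := PySem.Str.split₀ s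
        if parts.length ≥ 2 then
          some (out, defs.insert (parts.getD 1 "") (PySem.Str.join " " (parts.drop 2)), a :: as', m :: cs')
        else some (out, defs, a :: as', m :: cs')
      else if PySem.Str.startswith s "#ifdef" then
        let name := if (PySem.Str.split₀ s).length > 1 then (PySem.Str.split₀ s).getD 1 "" else ""
        let met := defs.contains name
        some (out, defs, (met && a) :: a :: as', met :: m :: cs')
      else if PySem.Str.startswith s "#ifndef" then
        let name := if (PySem.Str.split₀ s).length > 1 then (PySem.Str.split₀ s).getD 1 "" else ""
        let met := !defs.contains name
        some (out, defs, (met && a) :: a :: as', met :: m :: cs')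
      else if PySem.Str.startswith s "#else" then
        match as' with
        | [] => none                                  -- raise: #else without #ifdef/#ifndef
        | p :: as'' => some (out, defs, ((!m) && p) :: p :: as'', m :: cs')
      else if PySem.Str.startswith s "#endif" then
        match as', cs' with
        | [], _ => none                               -- raise: #endif without matching #ifdef
        | _ :: _, _ => some (out, defs, as', cs')
      else if a then some (out ++ [line], defs, a :: as', m :: cs')
      else some (out, defs, a :: as', m :: cs')
    | _, _ => none                                    -- unreachable: the stacks are never empty

def handle_conditionals_and_defines (code : String) : String × (List (String × String)) :=
  let lines := PySem.Str.splitlines code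
  match lines.foldl stepA (some ([], PySem.Dict.empty, [true], [true])) with
  | some (out, defs, astk, _) =>
      if astk.length > 1 then ("", [])                -- raise: Missing #endif at end of file
      else (PySem.Str.join "\n" out, defs.items)
  | none => ("", [])

-- ===== PORT B =====
inductive PPTerm | telse | tendif | teof
deriving DecidableEq, Repr

inductive WRes
  | fuelOut
  | err
  | ok (rest : List String) (t : PPTerm) (out : List String) (defs : PySem.Dict String String)
deriving DecidableEq, Repr

inductive CRes
  | fuelOut
  | err
  | ok (rest : List String) (out : List String) (defs : PySem.Dict String String)
deriving DecidableEq, Repr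

-- fuel is only a totality guard (3·|lines|+3 always suffices, proved below); `.err` models
-- Source B's CompilerError.  walkB is Source B's walk; condB/elseLoopB are Source B's conditional
-- (elseLoopB is its while-loop over the #else branches).
mutual
def walkB : Nat → List String → Bool → List String → PySem.Dict String String → WRes
  | 0, _, _, _, _ => .fuelOut
  | _ + 1, [], _, out, defs => .ok [] .teof out defs
  | fuel + 1, l :: ls, active, out, defs =>
    let s := PySem.Str.strip l
    if PySem.Str.startswith s "#define" then
      if active then
        let parts := PySem.Str.split₀ s
        if parts.length ≥ 2 then
          walkB fuel ls active out (defs.insert (parts.getD 1 "") (PySem.Str.join " " (parts.drop 2)))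
        else walkB fuel ls active out defs
      else walkB fuel ls active out defs
    else if PySem.Str.startswith s "#ifdef" || PySem.Str.startswith s "#ifndef" then
      let parts := PySem.Str.split₀ s
      let name := if parts.length > 1 then parts.getD 1 "" else ""
      let met := if PySem.Str.startswith s "#ifdef" then defs.contains name else !defs.contains name
      match condB fuel ls met active out defs with
      | .fuelOut => .fuelOut
      | .err => .err
      | .ok rest out' defs' => walkB fuel rest active out' defs'
    else if PySem.Str.startswith s "#else" then .ok ls .telse out defs
    else if PySem.Str.startswith s "#endif" then .ok ls .tendif out defs
    else if active then walkB fuel ls active (out ++ [l]) defs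
    else walkB fuel ls active out defs

def condB : Nat → List String → Bool → Bool → List String → PySem.Dict String String → CRes
  | 0, _, _, _, _, _ => .fuelOut
  | fuel + 1, ls, met, parent, out, defs =>
    match walkB fuel ls (met && parent) out defs with
    | .fuelOut => .fuelOut
    | .err => .err
    | .ok _ .teof _ _ => .err                         -- raise: Missing #endif at end of file
    | .ok rest .tendif out' defs' => .ok rest out' defs'
    | .ok rest .telse out' defs' => elseLoopB fuel rest met parent out' defs'

def elseLoopB : Nat → List String → Bool → Bool → List String → PySem.Dict String String → CRes
  | 0, _, _, _, _, _ => .fuelOut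
  | fuel + 1, ls, met, parent, out, defs =>
    match walkB fuel ls ((!met) && parent) out defs with
    | .fuelOut => .fuelOut
    | .err => .err
    | .ok _ .teof _ _ => .err                         -- raise: Missing #endif at end of file
    | .ok rest .tendif out' defs' => .ok rest out' defs'
    | .ok rest .telse out' defs' => elseLoopB fuel rest met parent out' defs'
end

def handle_conditionals_and_defines_alt (code : String) : String × (List (String × String)) :=
  let lines := PySem.Str.splitlines code
  match walkB (3 * lines.length + 3) lines true [] PySem.Dict.empty with
  | .ok _ .teof out defs => (PySem.Str.join "\n" out, defs.items)
  | _ => ("", [])                                     -- raise: unmatched #else/#endif or missing #endif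

-- ===== PRECONDITION & SPEC =====
-- Pre_: the conditional directives are balanced (no #else/#endif outside an open conditional,
-- no conditional left open at end of file); exactly on these inputs Python A returns instead
-- of raising CompilerError (B raises on the same inputs).
def preDepth : List String → Nat → Option Nat
  | [], d => some d
  | l :: ls, d =>
    let s := PySem.Str.strip l
    if PySem.Str.startswith s "#ifdef" || PySem.Str.startswith s "#ifndef" then preDepth ls (d + 1)
    else if PySem.Str.startswith s "#else" then (if d = 0 then none else preDepth ls d)
    else if PySem.Str.startswith s "#endif" then (if d = 0 then none else preDepth ls (d - 1))
    else preDepth ls d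

def Pre_handle_conditionals_and_defines (code : String) : Prop :=
  preDepth (PySem.Str.splitlines code) 0 = some 0

instance (code : String) : Decidable (Pre_handle_conditionals_and_defines code) := by
  unfold Pre_handle_conditionals_and_defines; infer_instance

def pvWitness_handle_conditionals_and_defines : String :=
  "#define A 1\n#ifdef A\nx\n#else\ny\n#endif\nz"

def Spec_handle_conditionals_and_defines (code : String) (out : String × (List (String × String))) : Prop := out = handle_conditionals_and_defines_alt code
instance (code : String) (out : String × (List (String × String))) : Decidable (Spec_handle_conditionals_and_defines code out) := by unfold Spec_handle_conditionals_and_defines; infer_instance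

-- ===== CLAIM (what is proved, stated in full; the proofs are below) =====
def Claim_equal_handle_conditionals_and_defines : Prop := ∀ (code : String), Dom_handle_conditionals_and_defines code → Pre_handle_conditionals_and_defines code → Spec_handle_conditionals_and_defines code (handle_conditionals_and_defines code)

-- ===== LEMMAS AND PROOFS =====

-- two char lists neither of which is a prefix of the other cannot both be prefixes of s
theorem startswith_excl (s p q : List Char) (h : PySem.Chars.startswith s p = true)
    (h1 : ¬ (q <+: p)) (h2 : ¬ (p <+: q)) :
    PySem.Chars.startswith s q = false := by
  cases hsw : PySem.Chars.startswith s q with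
  | false => rfl
  | true =>
    exfalso
    rw [PySem.Chars.startswith_iff] at h hsw
    rcases le_total p.length q.length with hle | hle
    · exact h2 (List.prefix_of_prefix_length_le h hsw hle)
    · exact h1 (List.prefix_of_prefix_length_le hsw h hle)

theorem foldl_stepA_none (ls : List String) : List.foldl stepA none ls = none := by
  induction ls with
  | nil => rfl
  | cons l ls ih => simpa [stepA] using ih

-- simulation invariant for walkB against A's fold, from A-state (o, d, a :: astk, cstk);
-- the last two conjuncts say fuel 3·|ls|+1 suffices and bound the returned rest
def WGoal (fuel : Nat) (ls : List String) (a : Bool) (o : List String)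
    (d : PySem.Dict String String) (astk cstk : List Bool) : Prop :=
  (∀ rest t o' d', walkB fuel ls a o d = .ok rest t o' d' →
    (t = .teof → rest = [] ∧
      List.foldl stepA (some (o, d, a :: astk, cstk)) ls = some (o', d', a :: astk, cstk)) ∧
    (t = .telse →
      (astk = [] → List.foldl stepA (some (o, d, a :: astk, cstk)) ls = none) ∧
      (∀ p as2 m cs2, astk = p :: as2 → cstk = m :: cs2 →
        List.foldl stepA (some (o, d, a :: astk, cstk)) ls =
          List.foldl stepA (some (o', d', ((!m) && p) :: p :: as2, m :: cs2)) rest)) ∧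
    (t = .tendif →
      (astk = [] → List.foldl stepA (some (o, d, a :: astk, cstk)) ls = none) ∧
      (∀ p as2 m cs2, astk = p :: as2 → cstk = m :: cs2 →
        List.foldl stepA (some (o, d, a :: astk, cstk)) ls =
          List.foldl stepA (some (o', d', p :: as2, cs2)) rest))) ∧
  (walkB fuel ls a o d = .err →
    ∃ o' d' S C, List.foldl stepA (some (o, d, a :: astk, cstk)) ls = some (o', d', S, C) ∧
      astk.length + 2 ≤ S.length) ∧
  (3 * ls.length + 1 ≤ fuel → walkB fuel ls a o d ≠ .fuelOut) ∧
  (∀ rest t o' d', walkB fuel ls a o d = .ok rest t o' d' →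
    (t = .teof → rest = []) ∧ (t ≠ .teof → rest.length < ls.length))

-- the same for condB, from the just-pushed A-state ((met && parent) :: parent :: as2, met :: cs2)
def CGoal (fuel : Nat) (ls : List String) (met parent : Bool) (o : List String)
    (d : PySem.Dict String String) (as2 cs2 : List Bool) : Prop :=
  (∀ rest o' d', condB fuel ls met parent o d = .ok rest o' d' →
    List.foldl stepA (some (o, d, (met && parent) :: parent :: as2, met :: cs2)) ls =
      List.foldl stepA (some (o', d', parent :: as2, cs2)) rest) ∧
  (condB fuel ls met parent o d = .err →
    ∃ o' d' S C,
      List.foldl stepA (some (o, d, (met && parent) :: parent :: as2, met :: cs2)) ls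
        = some (o', d', S, C) ∧ as2.length + 2 ≤ S.length) ∧
  (3 * ls.length + 2 ≤ fuel → condB fuel ls met parent o d ≠ .fuelOut) ∧
  (∀ rest o' d', condB fuel ls met parent o d = .ok rest o' d' → rest.length < ls.length)

-- and for elseLoopB, whose entry A-state has top of stack (!met) && parent
def EGoal (fuel : Nat) (ls : List String) (met parent : Bool) (o : List String)
    (d : PySem.Dict String String) (as2 cs2 : List Bool) : Prop :=
  (∀ rest o' d', elseLoopB fuel ls met parent o d = .ok rest o' d' →
    List.foldl stepA (some (o, d, ((!met) && parent) :: parent :: as2, met :: cs2)) ls =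
      List.foldl stepA (some (o', d', parent :: as2, cs2)) rest) ∧
  (elseLoopB fuel ls met parent o d = .err →
    ∃ o' d' S C,
      List.foldl stepA (some (o, d, ((!met) && parent) :: parent :: as2, met :: cs2)) ls
        = some (o', d', S, C) ∧ as2.length + 2 ≤ S.length) ∧
  (3 * ls.length + 2 ≤ fuel → elseLoopB fuel ls met parent o d ≠ .fuelOut) ∧
  (∀ rest o' d', elseLoopB fuel ls met parent o d = .ok rest o' d' → rest.length < ls.length)

def WP (fuel : Nat) : Prop :=
  ∀ ls a o d (astk cstk : List Bool), cstk.length = astk.length + 1 → WGoal fuel ls a o d astk cstk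
def CP (fuel : Nat) : Prop :=
  ∀ ls met parent o d (as2 cs2 : List Bool), cs2.length = as2.length + 1 → CGoal fuel ls met parent o d as2 cs2
def EP (fuel : Nat) : Prop :=
  ∀ ls met parent o d (as2 cs2 : List Bool), cs2.length = as2.length + 1 → EGoal fuel ls met parent o d as2 cs2

-- a walkB step that just moves to the tail (define line, plain line) transports the invariant
theorem WGoal_trans (n : Nat) (l : String) (ls rest : List String) (a : Bool)
    (o o2 : List String) (d d2 : PySem.Dict String String) (astk cstk : List Bool)
    (hw : walkB (n + 1) (l :: ls) a o d = walkB n rest a o2 d2)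
    (hfold : List.foldl stepA (some (o, d, a :: astk, cstk)) (l :: ls) =
      List.foldl stepA (some (o2, d2, a :: astk, cstk)) rest)
    (hrest : rest.length ≤ ls.length)
    (hfuel : 3 * (l :: ls).length + 1 ≤ n + 1 → 3 * rest.length + 1 ≤ n)
    (ih : WGoal n rest a o2 d2 astk cstk) :
    WGoal (n + 1) (l :: ls) a o d astk cstk := by
  obtain ⟨ih1, ih2, ih3, ih4⟩ := ih
  refine ⟨?_, ?_, ?_, ?_⟩
  · intro rest' t o' d' hok
    rw [hw] at hok
    have h := ih1 rest' t o' d' hok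
    refine ⟨fun ht => ⟨(h.1 ht).1, ?_⟩,
            fun ht => ⟨fun h0 => ?_, fun p as2 m cs2 h1 h2 => ?_⟩,
            fun ht => ⟨fun h0 => ?_, fun p as2 m cs2 h1 h2 => ?_⟩⟩
    · rw [hfold]; exact (h.1 ht).2
    · rw [hfold]; exact (h.2.1 ht).1 h0
    · rw [hfold]; exact (h.2.1 ht).2 p as2 m cs2 h1 h2
    · rw [hfold]; exact (h.2.2 ht).1 h0
    · rw [hfold]; exact (h.2.2 ht).2 p as2 m cs2 h1 h2
  · intro herr
    rw [hw] at herr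
    obtain ⟨o', d', S, C, hf, hS⟩ := ih2 herr
    exact ⟨o', d', S, C, by rw [hfold]; exact hf, hS⟩
  · intro hb; rw [hw]; exact ih3 (hfuel hb)
  · intro rest' t o' d' hok
    rw [hw] at hok
    have h := ih4 rest' t o' d' hok
    refine ⟨h.1, fun ht => ?_⟩
    have := h.2 ht
    simp only [List.length_cons]
    omega

-- an #else line: walkB returns; A performs the corresponding single step
theorem WGoal_else (n : Nat) (l : String) (ls : List String) (a : Bool) (o : List String)
    (d : PySem.Dict String String) (astk : List Bool) (m : Bool) (cs' : List Bool)
    (hw : walkB (n + 1) (l :: ls) a o d = .ok ls .telse o d)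
    (hstep0 : stepA (some (o, d, [a], m :: cs')) l = none)
    (hstepc : ∀ p as2, stepA (some (o, d, a :: p :: as2, m :: cs')) l =
      some (o, d, ((!m) && p) :: p :: as2, m :: cs')) :
    WGoal (n + 1) (l :: ls) a o d astk (m :: cs') := by
  refine ⟨?_, ?_, ?_, ?_⟩
  · intro rest t o' d' hok
    rw [hw] at hok
    obtain ⟨h1, h2, h3, h4⟩ := WRes.ok.inj hok
    subst h1; subst h3; subst h4
    refine ⟨fun ht => absurd (ht ▸ h2) (by decide),
            fun ht => ⟨fun h0 => ?_, fun p as2 m2 cs2 hastk hcstk => ?_⟩,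
            fun ht => absurd (ht ▸ h2) (by decide)⟩
    · subst h0
      rw [List.foldl_cons, hstep0, foldl_stepA_none]
    · subst hastk
      obtain ⟨h5, h6⟩ := List.cons.inj hcstk
      subst h5; subst h6
      rw [List.foldl_cons, hstepc p as2]
  · intro herr; rw [hw] at herr; exact WRes.noConfusion herr
  · intro _; rw [hw]; exact fun h => WRes.noConfusion h
  · intro rest t o' d' hok
    rw [hw] at hok
    obtain ⟨h1, h2, _, _⟩ := WRes.ok.inj hok
    subst h1
    exact ⟨fun ht => absurd (ht ▸ h2) (by decide), fun _ => by simp⟩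

-- an #endif line: walkB returns; A performs the corresponding pop step
theorem WGoal_endif (n : Nat) (l : String) (ls : List String) (a : Bool) (o : List String)
    (d : PySem.Dict String String) (astk : List Bool) (m : Bool) (cs' : List Bool)
    (hw : walkB (n + 1) (l :: ls) a o d = .ok ls .tendif o d)
    (hstep0 : stepA (some (o, d, [a], m :: cs')) l = none)
    (hstepc : ∀ p as2, stepA (some (o, d, a :: p :: as2, m :: cs')) l =
      some (o, d, p :: as2, cs')) :
    WGoal (n + 1) (l :: ls) a o d astk (m :: cs') := by
  refine ⟨?_, ?_, ?_, ?_⟩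
  · intro rest t o' d' hok
    rw [hw] at hok
    obtain ⟨h1, h2, h3, h4⟩ := WRes.ok.inj hok
    subst h1; subst h3; subst h4
    refine ⟨fun ht => absurd (ht ▸ h2) (by decide),
            fun ht => absurd (ht ▸ h2) (by decide),
            fun ht => ⟨fun h0 => ?_, fun p as2 m2 cs2 hastk hcstk => ?_⟩⟩
    · subst h0
      rw [List.foldl_cons, hstep0, foldl_stepA_none]
    · subst hastk
      obtain ⟨h5, h6⟩ := List.cons.inj hcstk
      subst h5; subst h6
      rw [List.foldl_cons, hstepc p as2]
  · intro herr; rw [hw] at herr; exact WRes.noConfusion herr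
  · intro _; rw [hw]; exact fun h => WRes.noConfusion h
  · intro rest t o' d' hok
    rw [hw] at hok
    obtain ⟨h1, h2, _, _⟩ := WRes.ok.inj hok
    subst h1
    exact ⟨fun ht => absurd (ht ▸ h2) (by decide), fun _ => by simp⟩

-- an #ifdef/#ifndef line: walkB descends into condB; A pushes (met && a, met)
theorem WGoal_ifdef (n : Nat) (l : String) (ls : List String) (a : Bool) (o : List String)
    (d : PySem.Dict String String) (astk : List Bool) (m : Bool) (cs' : List Bool) (met : Bool)
    (hlen : (m :: cs').length = astk.length + 1)
    (hw : walkB (n + 1) (l :: ls) a o d =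
      (match condB n ls met a o d with
       | .fuelOut => WRes.fuelOut
       | .err => WRes.err
       | .ok rest out' defs' => walkB n rest a out' defs'))
    (hstep : stepA (some (o, d, a :: astk, m :: cs')) l =
      some (o, d, (met && a) :: a :: astk, met :: m :: cs'))
    (ihW : WP n) (ihC : CP n) :
    WGoal (n + 1) (l :: ls) a o d astk (m :: cs') := by
  obtain ⟨hC1, hC2, hC3, hC4⟩ := ihC ls met a o d astk (m :: cs') hlen
  cases hcond : condB n ls met a o d with
  | fuelOut =>
    have hw' : walkB (n + 1) (l :: ls) a o d = .fuelOut := by rw [hw, hcond]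
    refine ⟨?_, ?_, ?_, ?_⟩
    · intro rest t o' d' hok; rw [hw'] at hok; exact WRes.noConfusion hok
    · intro herr; rw [hw'] at herr; exact WRes.noConfusion herr
    · intro hb
      exfalso
      refine hC3 ?_ hcond
      simp only [List.length_cons] at hb
      omega
    · intro rest t o' d' hok; rw [hw'] at hok; exact WRes.noConfusion hok
  | err =>
    have hw' : walkB (n + 1) (l :: ls) a o d = .err := by rw [hw, hcond]
    refine ⟨?_, ?_, ?_, ?_⟩
    · intro rest t o' d' hok; rw [hw'] at hok; exact WRes.noConfusion hok
    · intro _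
      obtain ⟨o', d', S, C, hf, hS⟩ := hC2 hcond
      exact ⟨o', d', S, C, by rw [List.foldl_cons, hstep]; exact hf, hS⟩
    · intro _; rw [hw']; exact fun h => WRes.noConfusion h
    · intro rest t o' d' hok; rw [hw'] at hok; exact WRes.noConfusion hok
  | ok rest2 o2 d2 =>
    have hw' : walkB (n + 1) (l :: ls) a o d = walkB n rest2 a o2 d2 := by rw [hw, hcond]
    have hrest : rest2.length < ls.length := hC4 rest2 o2 d2 hcond
    refine WGoal_trans n l ls rest2 a o o2 d d2 astk (m :: cs') hw' ?_ (le_of_lt hrest) ?_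
      (ihW rest2 a o2 d2 astk (m :: cs') hlen)
    · rw [List.foldl_cons, hstep]
      exact hC1 rest2 o2 d2 hcond
    · intro hb
      simp only [List.length_cons] at hb
      omega

theorem CGoal_succ (n : Nat) (ihW : WP n) (ihE : EP n)
    (ls : List String) (met parent : Bool) (o : List String) (d : PySem.Dict String String)
    (as2 cs2 : List Bool) (hlen : cs2.length = as2.length + 1) :
    CGoal (n + 1) ls met parent o d as2 cs2 := by
  have hlen' : (met :: cs2).length = (parent :: as2).length + 1 := by
    simp only [List.length_cons]; omega
  obtain ⟨hWok, hWerr, hWf, hWlen⟩ := ihW ls (met && parent) o d (parent :: as2) (met :: cs2) hlen'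
  refine ⟨?_, ?_, ?_, ?_⟩
  · intro rest o' d' hok
    simp only [condB] at hok
    cases hwalk : walkB n ls (met && parent) o d with
    | fuelOut => rw [hwalk] at hok; exact CRes.noConfusion hok
    | err => rw [hwalk] at hok; exact CRes.noConfusion hok
    | ok r t o1 d1 =>
      rw [hwalk] at hok
      cases t with
      | teof => exact CRes.noConfusion hok
      | tendif =>
        have hok' : CRes.ok r o1 d1 = CRes.ok rest o' d' := hok
        obtain ⟨e1, e2, e3⟩ := CRes.ok.inj hok'
        subst e1; subst e2; subst e3
        exact ((hWok r .tendif o1 d1 hwalk).2.2 rfl).2 parent as2 met cs2 rfl rfl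
      | telse =>
        have hok' : elseLoopB n r met parent o1 d1 = CRes.ok rest o' d' := hok
        have hfirst := ((hWok r .telse o1 d1 hwalk).2.1 rfl).2 parent as2 met cs2 rfl rfl
        rw [hfirst]
        exact (ihE r met parent o1 d1 as2 cs2 hlen).1 rest o' d' hok'
  · intro herr
    simp only [condB] at herr
    cases hwalk : walkB n ls (met && parent) o d with
    | fuelOut => rw [hwalk] at herr; exact absurd herr (by simp)
    | err =>
      obtain ⟨o', d', S, C, hf, hS⟩ := hWerr hwalk
      refine ⟨o', d', S, C, hf, ?_⟩
      simp only [List.length_cons] at hS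
      omega
    | ok r t o1 d1 =>
      rw [hwalk] at herr
      cases t with
      | teof =>
        obtain ⟨hr, hfold⟩ := (hWok r .teof o1 d1 hwalk).1 rfl
        exact ⟨o1, d1, _, _, hfold, by simp⟩
      | tendif => exact CRes.noConfusion herr
      | telse =>
        have herr' : elseLoopB n r met parent o1 d1 = CRes.err := herr
        have hfirst := ((hWok r .telse o1 d1 hwalk).2.1 rfl).2 parent as2 met cs2 rfl rfl
        obtain ⟨o', d', S, C, hf, hS⟩ := (ihE r met parent o1 d1 as2 cs2 hlen).2.1 herr'
        exact ⟨o', d', S, C, by rw [hfirst]; exact hf, hS⟩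
  · intro hb hcontra
    simp only [condB] at hcontra
    cases hwalk : walkB n ls (met && parent) o d with
    | fuelOut => exact hWf (by omega) hwalk
    | err => rw [hwalk] at hcontra; exact CRes.noConfusion hcontra
    | ok r t o1 d1 =>
      rw [hwalk] at hcontra
      cases t with
      | teof => exact CRes.noConfusion hcontra
      | tendif => exact CRes.noConfusion hcontra
      | telse =>
        have hcontra' : elseLoopB n r met parent o1 d1 = CRes.fuelOut := hcontra
        have hr : r.length < ls.length :=
          (hWlen r .telse o1 d1 hwalk).2 (fun h => PPTerm.noConfusion h)
        exact (ihE r met parent o1 d1 as2 cs2 hlen).2.2.1 (by omega) hcontra'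
  · intro rest o' d' hok
    simp only [condB] at hok
    cases hwalk : walkB n ls (met && parent) o d with
    | fuelOut => rw [hwalk] at hok; exact CRes.noConfusion hok
    | err => rw [hwalk] at hok; exact CRes.noConfusion hok
    | ok r t o1 d1 =>
      rw [hwalk] at hok
      cases t with
      | teof => exact CRes.noConfusion hok
      | tendif =>
        have hok' : CRes.ok r o1 d1 = CRes.ok rest o' d' := hok
        obtain ⟨e1, _, _⟩ := CRes.ok.inj hok'
        exact e1 ▸ (hWlen r .tendif o1 d1 hwalk).2 (fun h => PPTerm.noConfusion h)
      | telse =>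
        have hok' : elseLoopB n r met parent o1 d1 = CRes.ok rest o' d' := hok
        have hr : r.length < ls.length :=
          (hWlen r .telse o1 d1 hwalk).2 (fun h => PPTerm.noConfusion h)
        have := (ihE r met parent o1 d1 as2 cs2 hlen).2.2.2 rest o' d' hok'
        omega

theorem EGoal_succ (n : Nat) (ihW : WP n) (ihE : EP n)
    (ls : List String) (met parent : Bool) (o : List String) (d : PySem.Dict String String)
    (as2 cs2 : List Bool) (hlen : cs2.length = as2.length + 1) :
    EGoal (n + 1) ls met parent o d as2 cs2 := by
  have hlen' : (met :: cs2).length = (parent :: as2).length + 1 := by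
    simp only [List.length_cons]; omega
  obtain ⟨hWok, hWerr, hWf, hWlen⟩ := ihW ls ((!met) && parent) o d (parent :: as2) (met :: cs2) hlen'
  refine ⟨?_, ?_, ?_, ?_⟩
  · intro rest o' d' hok
    simp only [elseLoopB] at hok
    cases hwalk : walkB n ls ((!met) && parent) o d with
    | fuelOut => rw [hwalk] at hok; exact CRes.noConfusion hok
    | err => rw [hwalk] at hok; exact CRes.noConfusion hok
    | ok r t o1 d1 =>
      rw [hwalk] at hok
      cases t with
      | teof => exact CRes.noConfusion hok
      | tendif =>
        have hok' : CRes.ok r o1 d1 = CRes.ok rest o' d' := hok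
        obtain ⟨e1, e2, e3⟩ := CRes.ok.inj hok'
        subst e1; subst e2; subst e3
        exact ((hWok r .tendif o1 d1 hwalk).2.2 rfl).2 parent as2 met cs2 rfl rfl
      | telse =>
        have hok' : elseLoopB n r met parent o1 d1 = CRes.ok rest o' d' := hok
        have hfirst := ((hWok r .telse o1 d1 hwalk).2.1 rfl).2 parent as2 met cs2 rfl rfl
        rw [hfirst]
        exact (ihE r met parent o1 d1 as2 cs2 hlen).1 rest o' d' hok'
  · intro herr
    simp only [elseLoopB] at herr
    cases hwalk : walkB n ls ((!met) && parent) o d with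
    | fuelOut => rw [hwalk] at herr; exact absurd herr (by simp)
    | err =>
      obtain ⟨o', d', S, C, hf, hS⟩ := hWerr hwalk
      refine ⟨o', d', S, C, hf, ?_⟩
      simp only [List.length_cons] at hS
      omega
    | ok r t o1 d1 =>
      rw [hwalk] at herr
      cases t with
      | teof =>
        obtain ⟨hr, hfold⟩ := (hWok r .teof o1 d1 hwalk).1 rfl
        exact ⟨o1, d1, _, _, hfold, by simp⟩
      | tendif => exact CRes.noConfusion herr
      | telse =>
        have herr' : elseLoopB n r met parent o1 d1 = CRes.err := herr
        have hfirst := ((hWok r .telse o1 d1 hwalk).2.1 rfl).2 parent as2 met cs2 rfl rfl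
        obtain ⟨o', d', S, C, hf, hS⟩ := (ihE r met parent o1 d1 as2 cs2 hlen).2.1 herr'
        exact ⟨o', d', S, C, by rw [hfirst]; exact hf, hS⟩
  · intro hb hcontra
    simp only [elseLoopB] at hcontra
    cases hwalk : walkB n ls ((!met) && parent) o d with
    | fuelOut => exact hWf (by omega) hwalk
    | err => rw [hwalk] at hcontra; exact CRes.noConfusion hcontra
    | ok r t o1 d1 =>
      rw [hwalk] at hcontra
      cases t with
      | teof => exact CRes.noConfusion hcontra
      | tendif => exact CRes.noConfusion hcontra
      | telse =>
        have hcontra' : elseLoopB n r met parent o1 d1 = CRes.fuelOut := hcontra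
        have hr : r.length < ls.length :=
          (hWlen r .telse o1 d1 hwalk).2 (fun h => PPTerm.noConfusion h)
        exact (ihE r met parent o1 d1 as2 cs2 hlen).2.2.1 (by omega) hcontra'
  · intro rest o' d' hok
    simp only [elseLoopB] at hok
    cases hwalk : walkB n ls ((!met) && parent) o d with
    | fuelOut => rw [hwalk] at hok; exact CRes.noConfusion hok
    | err => rw [hwalk] at hok; exact CRes.noConfusion hok
    | ok r t o1 d1 =>
      rw [hwalk] at hok
      cases t with
      | teof => exact CRes.noConfusion hok
      | tendif =>
        have hok' : CRes.ok r o1 d1 = CRes.ok rest o' d' := hok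
        obtain ⟨e1, _, _⟩ := CRes.ok.inj hok'
        exact e1 ▸ (hWlen r .tendif o1 d1 hwalk).2 (fun h => PPTerm.noConfusion h)
      | telse =>
        have hok' : elseLoopB n r met parent o1 d1 = CRes.ok rest o' d' := hok
        have hr : r.length < ls.length :=
          (hWlen r .telse o1 d1 hwalk).2 (fun h => PPTerm.noConfusion h)
        have := (ihE r met parent o1 d1 as2 cs2 hlen).2.2.2 rest o' d' hok'
        omega

theorem simAll (fuel : Nat) : WP fuel ∧ CP fuel ∧ EP fuel := by
  induction fuel with
  | zero =>
    refine ⟨?_, ?_, ?_⟩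
    · intro ls a o d astk cstk hlen
      refine ⟨?_, ?_, ?_, ?_⟩
      · intro rest t o' d' hok; simp [walkB] at hok
      · intro herr; simp [walkB] at herr
      · intro hb; omega
      · intro rest t o' d' hok; simp [walkB] at hok
    · intro ls met parent o d as2 cs2 hlen
      refine ⟨?_, ?_, ?_, ?_⟩
      · intro rest o' d' hok; simp [condB] at hok
      · intro herr; simp [condB] at herr
      · intro hb; omega
      · intro rest o' d' hok; simp [condB] at hok
    · intro ls met parent o d as2 cs2 hlen
      refine ⟨?_, ?_, ?_, ?_⟩
      · intro rest o' d' hok; simp [elseLoopB] at hok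
      · intro herr; simp [elseLoopB] at herr
      · intro hb; omega
      · intro rest o' d' hok; simp [elseLoopB] at hok
  | succ n ih =>
    obtain ⟨ihW, ihC, ihE⟩ := ih
    have hW : WP (n + 1) := by
      intro ls a o d astk cstk hlen
      obtain ⟨m, cs', rfl⟩ : ∃ m cs', cstk = m :: cs' := by
        cases cstk with
        | nil => simp at hlen
        | cons m cs' => exact ⟨m, cs', rfl⟩
      cases ls with
      | nil =>
        refine ⟨?_, ?_, ?_, ?_⟩
        · intro rest t o' d' hok
          have hok' : WRes.ok ([] : List String) PPTerm.teof o d = WRes.ok rest t o' d' := hok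
          obtain ⟨h1, h2, h3, h4⟩ := WRes.ok.inj hok'
          subst h1; subst h3; subst h4
          exact ⟨fun _ => ⟨rfl, rfl⟩,
                 fun ht => absurd (ht ▸ h2) (by decide),
                 fun ht => absurd (ht ▸ h2) (by decide)⟩
        · intro herr; exact WRes.noConfusion herr
        · intro _ h; exact WRes.noConfusion h
        · intro rest t o' d' hok
          have hok' : WRes.ok ([] : List String) PPTerm.teof o d = WRes.ok rest t o' d' := hok
          obtain ⟨h1, h2, _, _⟩ := WRes.ok.inj hok'
          subst h1
          exact ⟨fun _ => rfl, fun ht => absurd h2.symm ht⟩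
      | cons l ls =>
        by_cases hc1 : PySem.Chars.startswith (PySem.Chars.strip l.toList) ['#', 'd', 'e', 'f', 'i', 'n', 'e'] = true
        · -- a #define line
          have e2 := startswith_excl _ ['#', 'd', 'e', 'f', 'i', 'n', 'e'] ['#', 'i', 'f', 'd', 'e', 'f'] hc1 (by decide) (by decide)
          have e3 := startswith_excl _ ['#', 'd', 'e', 'f', 'i', 'n', 'e'] ['#', 'i', 'f', 'n', 'd', 'e', 'f'] hc1 (by decide) (by decide)
          have e4 := startswith_excl _ ['#', 'd', 'e', 'f', 'i', 'n', 'e'] ['#', 'e', 'l', 's', 'e'] hc1 (by decide) (by decide)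
          have e5 := startswith_excl _ ['#', 'd', 'e', 'f', 'i', 'n', 'e'] ['#', 'e', 'n', 'd', 'i', 'f'] hc1 (by decide) (by decide)
          by_cases ha : a = true
          · by_cases hp : 2 ≤ (PySem.Str.split₀ (PySem.Str.strip l)).length
            · refine WGoal_trans n l ls ls a o o d
                (d.insert ((PySem.Str.split₀ (PySem.Str.strip l)).getD 1 "")
                  (PySem.Str.join " " ((PySem.Str.split₀ (PySem.Str.strip l)).drop 2)))
                astk (m :: cs') ?_ ?_ le_rfl ?_ (ihW ls a o _ astk (m :: cs') hlen)
              · simp [walkB, hc1, ha, hp]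
              · rw [List.foldl_cons]
                have hstep : stepA (some (o, d, a :: astk, m :: cs')) l =
                    some (o, d.insert ((PySem.Str.split₀ (PySem.Str.strip l)).getD 1 "")
                      (PySem.Str.join " " ((PySem.Str.split₀ (PySem.Str.strip l)).drop 2)),
                      a :: astk, m :: cs') := by
                  simp [stepA, hc1, ha, hp]
                rw [hstep]
              · intro hb; simp only [List.length_cons] at hb; omega
            · refine WGoal_trans n l ls ls a o o d d astk (m :: cs') ?_ ?_ le_rfl ?_
                (ihW ls a o d astk (m :: cs') hlen)
              · simp [walkB, hc1, ha, hp]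
              · rw [List.foldl_cons]
                have hstep : stepA (some (o, d, a :: astk, m :: cs')) l =
                    some (o, d, a :: astk, m :: cs') := by
                  simp [stepA, hc1, ha, hp]
                rw [hstep]
              · intro hb; simp only [List.length_cons] at hb; omega
          · have ha' : a = false := by simpa using ha
            refine WGoal_trans n l ls ls a o o d d astk (m :: cs') ?_ ?_ le_rfl ?_
              (ihW ls a o d astk (m :: cs') hlen)
            · simp [walkB, hc1, ha']
            · rw [List.foldl_cons]
              have hstep : stepA (some (o, d, a :: astk, m :: cs')) l =
                  some (o, d, a :: astk, m :: cs') := by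
                simp [stepA, hc1, ha', e2, e3, e4, e5]
              rw [hstep]
            · intro hb; simp only [List.length_cons] at hb; omega
        · have hc1' : PySem.Chars.startswith (PySem.Chars.strip l.toList) ['#', 'd', 'e', 'f', 'i', 'n', 'e'] = false := by
            simpa using hc1
          by_cases hc2 : PySem.Chars.startswith (PySem.Chars.strip l.toList) ['#', 'i', 'f', 'd', 'e', 'f'] = true
          · refine WGoal_ifdef n l ls a o d astk m cs'
              (d.contains (if (PySem.Str.split₀ (PySem.Str.strip l)).length > 1
                then (PySem.Str.split₀ (PySem.Str.strip l)).getD 1 "" else ""))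
              hlen ?_ ?_ ihW ihC
            · simp [walkB, hc1', hc2]
            · simp [stepA, hc1', hc2]
          · have hc2' : PySem.Chars.startswith (PySem.Chars.strip l.toList) ['#', 'i', 'f', 'd', 'e', 'f'] = false := by
              simpa using hc2
            by_cases hc3 : PySem.Chars.startswith (PySem.Chars.strip l.toList) ['#', 'i', 'f', 'n', 'd', 'e', 'f'] = true
            · refine WGoal_ifdef n l ls a o d astk m cs'
                (!d.contains (if (PySem.Str.split₀ (PySem.Str.strip l)).length > 1
                  then (PySem.Str.split₀ (PySem.Str.strip l)).getD 1 "" else ""))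
                hlen ?_ ?_ ihW ihC
              · simp [walkB, hc1', hc2', hc3]
              · simp [stepA, hc1', hc2', hc3]
            · have hc3' : PySem.Chars.startswith (PySem.Chars.strip l.toList) ['#', 'i', 'f', 'n', 'd', 'e', 'f'] = false := by
                simpa using hc3
              by_cases hc4 : PySem.Chars.startswith (PySem.Chars.strip l.toList) ['#', 'e', 'l', 's', 'e'] = true
              · refine WGoal_else n l ls a o d astk m cs' ?_ ?_ ?_
                · simp [walkB, hc1', hc2', hc3', hc4]
                · simp [stepA, hc1', hc2', hc3', hc4]
                · intro p as2; simp [stepA, hc1', hc2', hc3', hc4]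
              · have hc4' : PySem.Chars.startswith (PySem.Chars.strip l.toList) ['#', 'e', 'l', 's', 'e'] = false := by
                  simpa using hc4
                by_cases hc5 : PySem.Chars.startswith (PySem.Chars.strip l.toList) ['#', 'e', 'n', 'd', 'i', 'f'] = true
                · refine WGoal_endif n l ls a o d astk m cs' ?_ ?_ ?_
                  · simp [walkB, hc1', hc2', hc3', hc4', hc5]
                  · simp [stepA, hc1', hc2', hc3', hc4', hc5]
                  · intro p as2; simp [stepA, hc1', hc2', hc3', hc4', hc5]
                · have hc5' : PySem.Chars.startswith (PySem.Chars.strip l.toList) ['#', 'e', 'n', 'd', 'i', 'f'] = false := by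
                    simpa using hc5
                  by_cases ha : a = true
                  · refine WGoal_trans n l ls ls a o (o ++ [l]) d d astk (m :: cs') ?_ ?_ le_rfl ?_
                      (ihW ls a (o ++ [l]) d astk (m :: cs') hlen)
                    · simp [walkB, hc1', hc2', hc3', hc4', hc5', ha]
                    · rw [List.foldl_cons]
                      have hstep : stepA (some (o, d, a :: astk, m :: cs')) l =
                          some (o ++ [l], d, a :: astk, m :: cs') := by
                        simp [stepA, hc1', hc2', hc3', hc4', hc5', ha]
                      rw [hstep]
                    · intro hb; simp only [List.length_cons] at hb; omega
                  · have ha' : a = false := by simpa using ha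
                    refine WGoal_trans n l ls ls a o o d d astk (m :: cs') ?_ ?_ le_rfl ?_
                      (ihW ls a o d astk (m :: cs') hlen)
                    · simp [walkB, hc1', hc2', hc3', hc4', hc5', ha']
                    · rw [List.foldl_cons]
                      have hstep : stepA (some (o, d, a :: astk, m :: cs')) l =
                          some (o, d, a :: astk, m :: cs') := by
                        simp [stepA, hc1', hc2', hc3', hc4', hc5', ha']
                      rw [hstep]
                    · intro hb; simp only [List.length_cons] at hb; omega
    refine ⟨hW, ?_, ?_⟩
    · intro ls met parent o d as2 cs2 hlen
      exact CGoal_succ n ihW ihE ls met parent o d as2 cs2 hlen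
    · intro ls met parent o d as2 cs2 hlen
      exact EGoal_succ n ihW ihE ls met parent o d as2 cs2 hlen

-- ===== VERDICT (by name: the statement is the Claim_ definition above) =====
theorem handle_conditionals_and_defines_spec : Claim_equal_handle_conditionals_and_defines := by
  intro code hdom hpre
  unfold Spec_handle_conditionals_and_defines
  unfold handle_conditionals_and_defines handle_conditionals_and_defines_alt
  obtain ⟨hWt, -, -⟩ := simAll (3 * (PySem.Str.splitlines code).length + 3)
  obtain ⟨hok, herr, hfuelok, -⟩ :=
    hWt (PySem.Str.splitlines code) true [] PySem.Dict.empty [] [true] (by simp)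
  cases hw : walkB (3 * (PySem.Str.splitlines code).length + 3)
      (PySem.Str.splitlines code) true [] PySem.Dict.empty with
  | fuelOut => exact absurd hw (hfuelok (by omega))
  | err =>
    obtain ⟨o', d', S, C, hfold, hS⟩ := herr hw
    simp only [hw, hfold]
    rw [if_pos (by omega : S.length > 1)]
  | ok rest t o' d' =>
    obtain ⟨hteof, htelse, htendif⟩ := hok rest t o' d' hw
    cases t with
    | teof =>
      obtain ⟨-, hfold⟩ := hteof rfl
      simp only [hw, hfold]
      rw [if_neg (by simp : ¬ ([true] : List Bool).length > 1)]
    | telse =>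
      have hfold := (htelse rfl).1 rfl
      simp only [hw, hfold]
    | tendif =>
      have hfold := (htendif rfl).1 rfl
      simp only [hw, hfold]
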